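-- pv_equiv track=rewrite | github.com/AI4REALNET/Grid2Op_MORL | analyze_morl_wandb_runs.py | order_columns
-- ===== SOURCE A (Python) =====
-- def _strip_norm_suffix(col: str) -> str:
--     # Helper used for ordering: drop plotting/analysis suffixes.
--     if col.endswith("_util"):
--         col = col[:-5]
--     if col.endswith("_norm"):
--         col = col[:-5]
--     return col
--
-- def order_columns(cols, canonical_order):
--     """
--     Order `cols` so that:
--       1) columns appearing in `canonical_order` come first (in that order),
--       2) for each base name, the non-_norm version comes before _norm,
--       3) interaction features like *_x_gate are placed right after their base,
--       4) unknown columns are appended (stable alphabetical).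
--     """
--     cols = list(dict.fromkeys(cols))  # de-dup, keep first occurrence
--     base_index = {name: i for i, name in enumerate(canonical_order)}
--
--     def key(c):
--         base = _strip_norm_suffix(c)
--
--         # Place "*_x_gate" right after its base
--         is_gate_interaction = base.endswith("_x_gate")
--         base_for_order = base[:-7] if is_gate_interaction else base
--
--         idx = base_index.get(base_for_order, 10**9)
--
--         # within the same base: raw then norm then interaction
--         is_norm = c.endswith("_norm")
--         within = 0
--         if is_norm:
--             within = 1
--         if is_gate_interaction:
--             within = 2
--
--         return (idx, within, base, c)
--
--     known = [c for c in cols if base_index.get(_strip_norm_suffix(c).replace("_x_gate",""), None) is not None]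
--     unknown = [c for c in cols if c not in known]
--     # Sort all with key; unknown will drift to the end because idx=1e9
--     return sorted(cols, key=key)
-- ===== SOURCE B (Python) =====
-- def order_columns(cols, canonical_order):
--     # Bucket-by-canonical-index instead of one global 4-tuple key sort; drops A's
--     # dead quadratic known/unknown passes.
--     cols = list(dict.fromkeys(cols))  # de-dup, keep first occurrence
--     base_index = {name: i for i, name in enumerate(canonical_order)}
--     buckets = {}
--     for c in cols:
--         base = c
--         if base.endswith("_util"):
--             base = base[:-5]
--         if base.endswith("_norm"):
--             base = base[:-5]
--         gate = base.endswith("_x_gate")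
--         root = base[:-7] if gate else base
--         within = 2 if gate else (1 if c.endswith("_norm") else 0)
--         buckets.setdefault(base_index.get(root, 10 ** 9), []).append((within, base, c))
--     out = []
--     for i in sorted(buckets):
--         for _, _, c in sorted(buckets[i]):
--             out.append(c)
--     return out
-- ===== Notes on version B (the rewrite author's own statement) =====
-- stated objective: faster
-- what changed: B groups the deduplicated columns into per-canonical-index buckets and emits buckets in key order, each sorted by its (within, base, name) sub-key, instead of A's single global sort under a 4-tuple key; B also drops A's dead known/unknown passes, one of which is quadratic (`c not in known`).
import Mathlib
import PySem

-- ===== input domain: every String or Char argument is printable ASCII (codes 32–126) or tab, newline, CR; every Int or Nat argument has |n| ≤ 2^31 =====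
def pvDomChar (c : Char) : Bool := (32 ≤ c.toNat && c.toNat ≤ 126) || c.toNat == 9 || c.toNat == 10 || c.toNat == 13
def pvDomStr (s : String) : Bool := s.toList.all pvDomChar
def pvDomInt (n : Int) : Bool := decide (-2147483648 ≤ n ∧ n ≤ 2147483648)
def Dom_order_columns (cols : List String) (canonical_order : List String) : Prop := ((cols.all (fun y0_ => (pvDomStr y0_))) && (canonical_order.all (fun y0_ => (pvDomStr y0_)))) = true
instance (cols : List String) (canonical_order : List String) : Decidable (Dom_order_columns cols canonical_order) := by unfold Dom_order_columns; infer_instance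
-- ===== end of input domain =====

-- B buckets the deduplicated columns by canonical index and sorts each bucket by its
-- (within, base, c) sub-key instead of A's single global sort under a 4-tuple key,
-- and drops A's dead `known`/`unknown` passes (one of them quadratic).

-- ===== PORT A =====
def pvStripNorm (col : String) : String :=
  let col := if PySem.Str.endswith col "_util" then PySem.Str.slice col none (some (-5)) else col
  if PySem.Str.endswith col "_norm" then PySem.Str.slice col none (some (-5)) else col

-- {name: i for i, name in enumerate(canonical_order)}  (this dict-comprehension line is verbatim in both Pythons)
def pvBaseIndex (canonical_order : List String) : PySem.Dict String Int :=
  (PySem.List.enumerate canonical_order).foldl (fun d p => d.insert p.2 p.1) PySem.Dict.empty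

-- A's key(c): the Python 4-tuple (idx, within, base, c); tuple keys are ported through
-- PySem.List.sorted2, grouped ((idx, within), (base, c)) with each half compared
-- lexicographically as a two-element list — the same order as Python's 4-tuple
def pvKey (bi : PySem.Dict String Int) (c : String) : List Int × List String :=
  let base := pvStripNorm c
  let is_gate := PySem.Str.endswith base "_x_gate"
  let base_for_order := if is_gate then PySem.Str.slice base none (some (-7)) else base
  let idx := bi.getD base_for_order (10 ^ 9)
  let is_norm := PySem.Str.endswith c "_norm"
  let within : Int := if is_norm then 1 else 0
  let within := if is_gate then 2 else within
  ([idx, within], [base, c])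

def order_columns (cols : List String) (canonical_order : List String) : List String :=
  let cols := PySem.List.dedup cols
  let bi := pvBaseIndex canonical_order
  -- A's dead code: `known` and `unknown` are built but never used for the result
  let known := cols.filter (fun c => ((bi.get? (PySem.Str.replace (pvStripNorm c) "_x_gate" "")).isSome))
  let _unknown := cols.filter (fun c => !(known.contains c))
  PySem.List.sorted2 cols (fun c => (pvKey bi c).1) (fun c => (pvKey bi c).2)

-- ===== PORT B =====
def order_columns_alt (cols : List String) (canonical_order : List String) : List String :=
  let cols := PySem.List.dedup cols
  let bi := pvBaseIndex canonical_order
  -- buckets.setdefault(k, []).append(e)  ≡  buckets[k] = buckets.get(k, []) + [e]  → Dict.modify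
  let buckets := cols.foldl (fun (buckets : PySem.Dict Int (List (Int × String × String))) c =>
    let base := c
    let base := if PySem.Str.endswith base "_util" then PySem.Str.slice base none (some (-5)) else base
    let base := if PySem.Str.endswith base "_norm" then PySem.Str.slice base none (some (-5)) else base
    let gate := PySem.Str.endswith base "_x_gate"
    let root := if gate then PySem.Str.slice base none (some (-7)) else base
    let within : Int := if gate then 2 else if PySem.Str.endswith c "_norm" then 1 else 0
    buckets.modify (bi.getD root (10 ^ 9)) [] (· ++ [(within, base, c)])) PySem.Dict.empty
  (PySem.List.sorted buckets.keys (fun i => i)).foldl (fun out i =>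
    (PySem.List.sorted2 (buckets.getD i []) (fun t => t.1) (fun t => [t.2.1, t.2.2])).foldl
      (fun out t => out ++ [t.2.2]) out) []

-- ===== PRECONDITION & SPEC =====
def Spec_order_columns (cols : List String) (canonical_order : List String) (out : List String) : Prop := out = order_columns_alt cols canonical_order
instance (cols : List String) (canonical_order : List String) (out : List String) : Decidable (Spec_order_columns cols canonical_order out) := by unfold Spec_order_columns; infer_instance

-- ===== CLAIM (what is proved, stated in full; the proofs are below) =====
def Claim_equal_order_columns : Prop := ∀ (cols : List String) (canonical_order : List String), Dom_order_columns cols canonical_order → Spec_order_columns cols canonical_order (order_columns cols canonical_order)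

-- ===== LEMMAS AND PROOFS =====

-- B's base/idx/entry computations, named for the proofs (definitionally the port's lets)
def pvBase (c : String) : String :=
  let base := c
  let base := if PySem.Str.endswith base "_util" then PySem.Str.slice base none (some (-5)) else base
  if PySem.Str.endswith base "_norm" then PySem.Str.slice base none (some (-5)) else base

def pvIdx (bi : PySem.Dict String Int) (c : String) : Int :=
  let base := pvBase c
  let gate := PySem.Str.endswith base "_x_gate"
  let root := if gate then PySem.Str.slice base none (some (-7)) else base
  bi.getD root (10 ^ 9)

def pvEnt (c : String) : Int × String × String :=
  let base := pvBase c
  let gate := PySem.Str.endswith base "_x_gate"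
  let within : Int := if gate then 2 else if PySem.Str.endswith c "_norm" then 1 else 0
  (within, base, c)

def pvK3 (t : Int × String × String) : Int ×ₗ List String :=
  toLex (t.1, [t.2.1, t.2.2])

-- A's full 4-part key, as one lexicographic value (proof-side only)
def pvK4 (bi : PySem.Dict String Int) (c : String) : (List Int) ×ₗ (List String) :=
  toLex ([pvIdx bi c, (pvEnt c).1], [(pvEnt c).2.1, c])

-- sorted2 (a tuple-key sort) is sorted under the combined lexicographic key
-- (stated once per key-type pair used by the ports, so the instances line up)
lemma pvSorted2_eqA (xs : List String) (k1 : String → List Int) (k2 : String → List String) :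
    PySem.List.sorted2 xs k1 k2 = PySem.List.sorted xs (fun x => toLex (k1 x, k2 x)) := by
  rw [PySem.List.sorted_eq_foldl_insertBy]
  show List.foldl (fun acc x => PySem.List.insertBy
      (fun a b => decide (k1 a < k1 b) || (!decide (k1 b < k1 a) && decide (k2 a < k2 b))) x acc) [] xs = _
  have hf : (fun (a b : String) => decide (k1 a < k1 b) || (!decide (k1 b < k1 a) && decide (k2 a < k2 b)))
      = (fun (a b : String) => decide (toLex (k1 a, k2 a) < toLex (k1 b, k2 b))) := by
    funext a b
    by_cases h1 : k1 a < k1 b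
    · simp [Prod.Lex.toLex_lt_toLex, h1]
    · by_cases h2 : k1 b < k1 a
      · simp [Prod.Lex.toLex_lt_toLex, h1, h2, ne_of_gt h2]
      · have he : k1 a = k1 b := le_antisymm (not_lt.mp h2) (not_lt.mp h1)
        simp [Prod.Lex.toLex_lt_toLex, he]
  rw [hf]

lemma pvSorted2_eqB (xs : List (Int × String × String))
    (k1 : Int × String × String → Int) (k2 : Int × String × String → List String) :
    PySem.List.sorted2 xs k1 k2 = PySem.List.sorted xs (fun x => toLex (k1 x, k2 x)) := by
  rw [PySem.List.sorted_eq_foldl_insertBy]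
  show List.foldl (fun acc x => PySem.List.insertBy
      (fun a b => decide (k1 a < k1 b) || (!decide (k1 b < k1 a) && decide (k2 a < k2 b))) x acc) [] xs = _
  have hf : (fun (a b : Int × String × String) => decide (k1 a < k1 b) || (!decide (k1 b < k1 a) && decide (k2 a < k2 b)))
      = (fun (a b : Int × String × String) => decide (toLex (k1 a, k2 a) < toLex (k1 b, k2 b))) := by
    funext a b
    by_cases h1 : k1 a < k1 b
    · simp [Prod.Lex.toLex_lt_toLex, h1]
    · by_cases h2 : k1 b < k1 a
      · simp [Prod.Lex.toLex_lt_toLex, h1, h2, ne_of_gt h2]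
      · have he : k1 a = k1 b := le_antisymm (not_lt.mp h2) (not_lt.mp h1)
        simp [Prod.Lex.toLex_lt_toLex, he]
  rw [hf]

lemma pvKey_combined (bi : PySem.Dict String Int) (c : String) :
    toLex ((pvKey bi c).1, (pvKey bi c).2) = pvK4 bi c := by
  simp only [pvKey, pvK4, pvIdx, pvEnt, pvBase, pvStripNorm]
  split <;> rfl

lemma pvEnt_third (c : String) : (pvEnt c).2.2 = c := rfl

lemma pvK3_inj : Function.Injective pvK3 := by
  intro a b h
  simp only [pvK3, toLex_inj, Prod.mk.injEq, List.cons.injEq, and_true] at h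
  exact Prod.ext h.1 (Prod.ext h.2.1 h.2.2)

lemma pvEnt_inj : Function.Injective pvEnt := by
  intro a b h
  exact congrArg (·.2.2) h

-- the contents of B's bucket dict after the fold
lemma pvBuckets_getD (ds : List String) (bi : PySem.Dict String Int) (i : Int) :
    (ds.foldl (fun (b : PySem.Dict Int (List (Int × String × String))) c =>
        b.modify (pvIdx bi c) [] (· ++ [pvEnt c])) PySem.Dict.empty).getD i []
      = (ds.filter (fun c => pvIdx bi c == i)).map pvEnt := by
  have h : ds.foldl (fun (b : PySem.Dict Int (List (Int × String × String))) c =>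
        b.modify (pvIdx bi c) [] (· ++ [pvEnt c])) PySem.Dict.empty
      = (ds.map (fun c => (pvIdx bi c, pvEnt c))).foldl
          (fun b p => b.modify p.1 [] (· ++ [p.2])) PySem.Dict.empty := by
    rw [List.foldl_map]
  rw [h, PySem.Dict.getD_foldl_modify_append, PySem.Dict.getD_empty, List.filter_map]
  simp [List.map_map]; rfl

lemma pvBuckets_keys (ds : List String) (bi : PySem.Dict String Int) :
    (ds.foldl (fun (b : PySem.Dict Int (List (Int × String × String))) c =>
        b.modify (pvIdx bi c) [] (· ++ [pvEnt c])) PySem.Dict.empty).keys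
      = PySem.List.dedup (ds.map (pvIdx bi)) := by
  rw [PySem.Dict.keys_foldl_modify_key ds (fun c => pvIdx bi c) [] (fun _ c => (· ++ [pvEnt c]))]
  simp [PySem.Dict.keys_empty, PySem.List.dedup_eq_ofList]
  rfl

lemma pvFlatMap_perm_congr {α β : Type} (J : List β) (f g : β → List α)
    (h : ∀ i ∈ J, (f i).Perm (g i)) : (J.flatMap f).Perm (J.flatMap g) := by
  induction J with
  | nil => simp
  | cons j J ih =>
    simp only [List.flatMap_cons]
    exact (h j (by simp)).append (ih (fun i hi => h i (by simp [hi])))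

-- grouping a list by the distinct values of a key is a permutation of it
lemma pvGroup_perm {α β : Type} [DecidableEq β] (J : List β) (f : α → β) :
    ∀ ds : List α, J.Nodup → (∀ c ∈ ds, f c ∈ J) →
      (J.flatMap (fun i => ds.filter (fun c => f c == i))).Perm ds := by
  induction J with
  | nil =>
    intro ds _ hmem
    cases ds with
    | nil => simp
    | cons c t => exact absurd (hmem c (by simp)) (by simp)
  | cons j J ih =>
    intro ds hnd hmem
    simp only [List.flatMap_cons]
    have hj : j ∉ J := (List.nodup_cons.mp hnd).1
    have hrest : (J.flatMap (fun i => ds.filter (fun c => f c == i)))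
        = (J.flatMap (fun i => (ds.filter (fun c => !(f c == j))).filter (fun c => f c == i))) := by
      apply List.flatMap_congr
      intro i hi
      rw [List.filter_filter]
      apply List.filter_congr
      intro c _
      by_cases h : f c = i
      · have hne : ¬ (f c = j) := fun hh => hj (hh ▸ h ▸ hi)
        simp [h]
        exact fun hh => hj (hh ▸ hi)
      · simp [h]
    rw [hrest]
    have ih' := ih (ds.filter (fun c => !(f c == j))) (List.nodup_cons.mp hnd).2
      (by
        intro c hc
        rw [List.mem_filter] at hc
        have hm := hmem c hc.1
        simp at hc
        simp at hm
        rcases hm with h | h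
        · exact absurd h hc.2
        · exact h)
    exact (List.Perm.append_left _ ih').trans (List.filter_append_perm _ ds)

-- B's result in closed form: sorted bucket keys, each bucket sorted by the 3-part sub-key
lemma pvAlt_eq (cols canonical_order : List String) :
    order_columns_alt cols canonical_order =
      (PySem.List.sorted (PySem.List.dedup ((PySem.List.dedup cols).map (pvIdx (pvBaseIndex canonical_order)))) (fun i => i)).flatMap
        (fun i => (PySem.List.sorted (((PySem.List.dedup cols).filter (fun c => pvIdx (pvBaseIndex canonical_order) c == i)).map pvEnt) pvK3).map (·.2.2)) := by
  have h0 : order_columns_alt cols canonical_order =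
      (PySem.List.sorted ((PySem.List.dedup cols).foldl (fun (b : PySem.Dict Int (List (Int × String × String))) c =>
          b.modify (pvIdx (pvBaseIndex canonical_order) c) [] (· ++ [pvEnt c])) PySem.Dict.empty).keys (fun i => i)).foldl
        (fun out i =>
          (PySem.List.sorted2 (((PySem.List.dedup cols).foldl (fun (b : PySem.Dict Int (List (Int × String × String))) c =>
              b.modify (pvIdx (pvBaseIndex canonical_order) c) [] (· ++ [pvEnt c])) PySem.Dict.empty).getD i [])
            (fun t => t.1) (fun t => [t.2.1, t.2.2])).foldl
            (fun out t => out ++ [t.2.2]) out) [] := rfl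
  rw [h0]
  simp only [pvSorted2_eqB, pvBuckets_keys, pvBuckets_getD, PySem.List.foldl_append_singleton_eq_map,
    PySem.List.foldl_append_eq_flatMap, List.nil_append]
  rfl

-- ===== VERDICT (by name: the statement is the Claim_ definition above) =====
theorem order_columns_spec : Claim_equal_order_columns := by
  intro cols co _hdom
  show order_columns cols co = order_columns_alt cols co
  rw [pvAlt_eq]
  have hA : order_columns cols co
      = PySem.List.sorted2 (PySem.List.dedup cols)
          (fun c => (pvKey (pvBaseIndex co) c).1) (fun c => (pvKey (pvBaseIndex co) c).2) := rfl
  rw [hA, pvSorted2_eqA]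
  have hK : (fun c => toLex ((pvKey (pvBaseIndex co) c).1, (pvKey (pvBaseIndex co) c).2))
      = pvK4 (pvBaseIndex co) := funext (pvKey_combined (pvBaseIndex co))
  rw [hK]
  have hJnodup : (PySem.List.sorted (PySem.List.dedup ((PySem.List.dedup cols).map (pvIdx (pvBaseIndex co)))) (fun i => i)).Nodup :=
    ((PySem.List.sorted_perm _ _ _).nodup_iff).mpr (PySem.List.nodup_dedup _)
  have hJlt : (PySem.List.sorted (PySem.List.dedup ((PySem.List.dedup cols).map (pvIdx (pvBaseIndex co)))) (fun i => i)).Pairwise (· < ·) := by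
    rw [PySem.List.dedup_eq_ofList]
    exact PySem.List.sorted_ofList_pairwise_lt _
  have hmemJ : ∀ c ∈ PySem.List.dedup cols, pvIdx (pvBaseIndex co) c ∈
      PySem.List.sorted (PySem.List.dedup ((PySem.List.dedup cols).map (pvIdx (pvBaseIndex co)))) (fun i => i) := by
    intro c hc
    rw [PySem.List.mem_sorted, PySem.List.mem_dedup]
    exact List.mem_map_of_mem hc
  have hEelem : ∀ (i : Int), ∀ t ∈ ((PySem.List.dedup cols).filter (fun c => pvIdx (pvBaseIndex co) c == i)).map pvEnt,
      pvEnt t.2.2 = t ∧ pvIdx (pvBaseIndex co) t.2.2 = i := by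
    intro i t ht
    rcases List.mem_map.mp ht with ⟨c, hc, rfl⟩
    rw [pvEnt_third]
    exact ⟨rfl, by simpa using (List.mem_filter.mp hc).2⟩
  have hEnodup : ∀ (i : Int), (((PySem.List.dedup cols).filter (fun c => pvIdx (pvBaseIndex co) c == i)).map pvEnt).Nodup :=
    fun i => List.Nodup.map pvEnt_inj ((PySem.List.nodup_dedup cols).filter _)
  apply PySem.List.sorted_eq_of_perm_of_pairwise_lt
  · -- permutation
    refine (pvFlatMap_perm_congr _ _ (fun i => (PySem.List.dedup cols).filter (fun c => pvIdx (pvBaseIndex co) c == i)) ?_).trans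
      (pvGroup_perm _ (pvIdx (pvBaseIndex co)) _ hJnodup hmemJ)
    intro i _
    refine ((PySem.List.sorted_perm _ pvK3 false).map (·.2.2)).trans ?_
    rw [List.map_map]
    show (List.map (fun c => (pvEnt c).2.2) _).Perm _
    rw [List.map_congr_left (fun c _ => pvEnt_third c), List.map_id']
  · -- strictly increasing keys
    rw [List.pairwise_flatMap]
    constructor
    · intro i _
      rw [List.pairwise_map]
      have h1 := PySem.List.sorted_pairwise (((PySem.List.dedup cols).filter (fun c => pvIdx (pvBaseIndex co) c == i)).map pvEnt) pvK3
      have h2 : (PySem.List.sorted (((PySem.List.dedup cols).filter (fun c => pvIdx (pvBaseIndex co) c == i)).map pvEnt) pvK3).Nodup :=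
        ((PySem.List.sorted_perm _ _ _).nodup_iff).mpr (hEnodup i)
      refine List.Pairwise.imp_of_mem ?_ (h1.and h2)
      intro a b ha hb hab
      have ha' := hEelem i a ((PySem.List.mem_sorted _ _ _ _).mp ha)
      have hb' := hEelem i b ((PySem.List.mem_sorted _ _ _ _).mp hb)
      have hlt : pvK3 a < pvK3 b := lt_of_le_of_ne hab.1 (fun e => hab.2 (pvK3_inj e))
      have hxa : pvK4 (pvBaseIndex co) a.2.2 = toLex ([i, a.1], [a.2.1, a.2.2]) := by
        simp [pvK4, ha'.1, ha'.2]
      have hxb : pvK4 (pvBaseIndex co) b.2.2 = toLex ([i, b.1], [b.2.1, b.2.2]) := by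
        simp [pvK4, hb'.1, hb'.2]
      rw [hxa, hxb, Prod.Lex.toLex_lt_toLex]
      simp only [pvK3] at hlt
      rw [Prod.Lex.toLex_lt_toLex] at hlt
      rcases hlt with h | ⟨he, h⟩
      · left
        rw [List.cons_lt_cons_iff]
        right
        exact ⟨rfl, by rw [List.cons_lt_cons_iff]; exact Or.inl h⟩
      · right
        exact ⟨by rw [he], h⟩
    · refine List.Pairwise.imp_of_mem ?_ hJlt
      intro i j _ _ hij x hx y hy
      rcases List.mem_map.mp hx with ⟨t, ht, rfl⟩
      rcases List.mem_map.mp hy with ⟨u, hu, rfl⟩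
      have ht' := hEelem i t ((PySem.List.mem_sorted _ _ _ _).mp ht)
      have hu' := hEelem j u ((PySem.List.mem_sorted _ _ _ _).mp hu)
      have hxt : pvK4 (pvBaseIndex co) t.2.2 = toLex ([i, t.1], [t.2.1, t.2.2]) := by
        simp [pvK4, ht'.1, ht'.2]
      have hxu : pvK4 (pvBaseIndex co) u.2.2 = toLex ([j, u.1], [u.2.1, u.2.2]) := by
        simp [pvK4, hu'.1, hu'.2]
      rw [hxt, hxu, Prod.Lex.toLex_lt_toLex]
      left
      rw [List.cons_lt_cons_iff]
      left
      exact hij
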